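-- pv_equiv track=rewrite | github.com/f-y/peng-sheets | python-modules/headless_editor.py | _escape_pipe
-- ===== SOURCE A (Python) =====
-- def _escape_pipe(value):
--     """Escape pipe characters for GFM table cells.
--
--     Converts | to \\| so the parser treats it as literal pipe.
--     Note: Pipes inside backticks are handled by the parser, but raw pipes need escaping.
--     """
--     if not value or "|" not in value:
--         return value
--
--     # Don't escape pipes that are already escaped or inside backticks
--     result = []
--     in_code = False
--     i = 0
--     n = len(value)
--
--     while i < n:
--         char = value[i]
--
--         if char == "`":
--             in_code = not in_code
--             result.append(char)
--             i += 1
--         elif char == "\\" and i + 1 < n: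
--             # Already escaped, keep as is
--             result.append(char)
--             result.append(value[i + 1])
--             i += 2
--         elif char == "|" and not in_code:
--             # Escape the pipe
--             result.append("\\|")
--             i += 1
--         else:
--             result.append(char)
--             i += 1
--
--     return "".join(result)
-- ===== SOURCE B (Python) =====
-- def _escape_pipe(value):
--     if not value or "|" not in value:
--         return value
--     # Phase 1: tokenize into escaped pairs "\X" and single characters
--     # (a trailing lone backslash becomes its own single-char token).
--     chars = iter(value)
--     tokens = []
--     for c in chars:
--         if c == "\\":
--             nxt = next(chars, None)
--             tokens.append(c if nxt is None else c + nxt)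
--         else:
--             tokens.append(c)
--     # Phase 2: fold over tokens with an in-code flag.
--     out = []
--     in_code = False
--     for t in tokens:
--         if t == "`":
--             in_code = not in_code
--             out.append(t)
--         elif t == "|" and not in_code:
--             out.append("\\|")
--         else:
--             out.append(t)
--     return "".join(out)
-- ===== Notes on version B (the rewrite author's own statement) =====
-- stated objective: alternative
-- what changed: Replaces the index-based while-loop with manual i+=1/i+=2 stepping by a two-phase pipeline: first tokenize the string into escaped pairs and single characters, then fold over the tokens with an in-code flag that rewrites bare pipe tokens to escaped ones.
import Mathlib
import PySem

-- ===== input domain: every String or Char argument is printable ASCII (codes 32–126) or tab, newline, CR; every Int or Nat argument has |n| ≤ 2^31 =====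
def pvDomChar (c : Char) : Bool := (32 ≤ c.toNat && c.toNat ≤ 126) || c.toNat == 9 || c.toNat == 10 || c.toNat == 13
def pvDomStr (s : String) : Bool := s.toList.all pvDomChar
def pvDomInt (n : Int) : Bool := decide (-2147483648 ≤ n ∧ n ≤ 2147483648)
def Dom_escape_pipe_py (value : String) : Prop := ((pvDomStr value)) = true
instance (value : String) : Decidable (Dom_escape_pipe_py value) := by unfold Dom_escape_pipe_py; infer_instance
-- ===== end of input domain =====

-- B replaces A's index-stepping while-loop by a two-phase pipeline (tokenize escaped pairs, then fold with an in-code flag); alternative decomposition, same cost.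

-- ===== PORT A =====
-- A's while-loop over index i, transcribed as structural recursion on the remaining characters
-- (branch order as in A: backtick, backslash-with-lookahead, unescaped pipe, default).
def pvLoopA (inCode : Bool) : List Char → List Char
  | [] => []
  | c :: rest =>
    if c = '`' then c :: pvLoopA (!inCode) rest
    else if c = '\\' ∧ rest ≠ [] then
      match rest with
      | [] => [c]          -- unreachable (rest ≠ [])
      | d :: rest' => c :: d :: pvLoopA inCode rest'
    else if c = '|' ∧ inCode = false then '\\' :: '|' :: pvLoopA inCode rest
    else c :: pvLoopA inCode rest

def escape_pipe_py (value : String) : String :=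
  -- 'not value or "|" not in value' (membership of a single char = list membership)
  if value = "" ∨ ¬ value.toList.contains '|' then value
  else String.ofList (pvLoopA false value.toList)

-- ===== PORT B =====
-- Phase 1 of Source B: tokenize into escaped pairs and single characters.
def pvTokenize : List Char → List (List Char)
  | [] => []
  | c :: rest =>
    if c = '\\' then
      match rest with
      | [] => [c] :: []                    -- next(chars, None) is None: lone backslash token
      | d :: rest' => [c, d] :: pvTokenize rest'
    else [c] :: pvTokenize rest

-- Phase 2 of Source B: the for-loop over tokens with state (in_code, out).
def pvStepB (st : Bool × List (List Char)) (t : List Char) : Bool × List (List Char) :=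
  if t = ['`'] then (!st.1, st.2 ++ [t])
  else if t = ['|'] ∧ st.1 = false then (st.1, st.2 ++ [['\\', '|']])
  else (st.1, st.2 ++ [t])

def escape_pipe_py_alt (value : String) : String :=
  if value = "" ∨ ¬ value.toList.contains '|' then value
  else String.ofList (((pvTokenize value.toList).foldl pvStepB (false, [])).2.flatten)

-- ===== PRECONDITION & SPEC =====
def Spec_escape_pipe_py (value : String) (out : String) : Prop := out = escape_pipe_py_alt value
instance (value : String) (out : String) : Decidable (Spec_escape_pipe_py value out) := by unfold Spec_escape_pipe_py; infer_instance

-- ===== CLAIM (what is proved, stated in full; the proofs are below) =====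
def Claim_equal_escape_pipe_py : Prop := ∀ (value : String), Dom_escape_pipe_py value → Spec_escape_pipe_py value (escape_pipe_py value)

-- ===== LEMMAS AND PROOFS =====

-- the fold's flag does not depend on the accumulated output, and output accumulates by append
theorem pvStepB_acc (ts : List (List Char)) (b : Bool) (acc : List (List Char)) :
    ts.foldl pvStepB (b, acc) =
      ((ts.foldl pvStepB (b, [])).1, acc ++ (ts.foldl pvStepB (b, [])).2) := by
  induction ts generalizing b acc with
  | nil => simp
  | cons t ts ih =>
    simp only [List.foldl_cons]
    rw [ih, ih (pvStepB (b, []) t).1 (pvStepB (b, []) t).2]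
    unfold pvStepB
    split_ifs <;> simp

-- A's loop equals B's tokenize-then-fold, for every starting flag
theorem pvLoopA_bt (b : Bool) (rest : List Char) :
    pvLoopA b ('`' :: rest) = '`' :: pvLoopA (!b) rest := by
  rw [pvLoopA.eq_def]; simp

theorem pvLoopA_bs (b : Bool) (d : Char) (rest : List Char) :
    pvLoopA b ('\\' :: d :: rest) = '\\' :: d :: pvLoopA b rest := by
  rw [pvLoopA.eq_def]; simp

theorem pvLoopA_pipe (rest : List Char) :
    pvLoopA false ('|' :: rest) = '\\' :: '|' :: pvLoopA false rest := by
  rw [pvLoopA.eq_def]; simp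

theorem pvLoopA_other (b : Bool) (c : Char) (rest : List Char)
    (hbt : ¬ c = '`') (hbs : ¬ c = '\\') (hp : ¬ (c = '|' ∧ b = false)) :
    pvLoopA b (c :: rest) = c :: pvLoopA b rest := by
  rw [pvLoopA.eq_def]
  simp only [if_neg hbt]
  rw [if_neg (by simp [hbs]), if_neg (by simpa using hp)]

theorem pvTokenize_other (c : Char) (rest : List Char) (hc : ¬ c = '\\') :
    pvTokenize (c :: rest) = [c] :: pvTokenize rest := by
  rw [pvTokenize.eq_def]; simp [hc]

theorem pvLoopA_eq (l : List Char) (b : Bool) :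
    pvLoopA b l = ((pvTokenize l).foldl pvStepB (b, [])).2.flatten := by
  induction l using pvTokenize.induct generalizing b with
  | case1 => simp [pvLoopA, pvTokenize]
  | case2 =>
    -- l = ['\\']: lone trailing backslash
    simp [pvLoopA, pvTokenize, pvStepB]
  | case3 d rest' ih =>
    -- l = '\\' :: d :: rest'
    have hb : pvStepB (b, []) ['\\', d] = (b, [['\\', d]]) := by
      unfold pvStepB; simp
    simp only [pvTokenize, if_true, List.foldl_cons]
    rw [pvStepB_acc, hb, pvLoopA_bs]
    simp [ih b]
  | case4 c rest hc ih =>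
    rw [pvTokenize_other c rest hc]
    simp only [List.foldl_cons]
    rw [pvStepB_acc]
    by_cases hbt : c = '`'
    · subst hbt
      have hb : pvStepB (b, []) ['`'] = (!b, [['`']]) := by unfold pvStepB; simp
      rw [hb, pvLoopA_bt]
      simp [ih (!b)]
    · by_cases hp : c = '|' ∧ b = false
      · obtain ⟨hp1, hp2⟩ := hp; subst hp1; subst hp2
        have hb : pvStepB (false, []) ['|'] = (false, [['\\', '|']]) := by
          unfold pvStepB; simp
        rw [hb, pvLoopA_pipe]
        simp [ih false]
      · have hb : pvStepB (b, []) [c] = (b, [[c]]) := by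
          unfold pvStepB
          rw [if_neg (by simp [hbt]), if_neg (by simpa using hp)]
          simp
        rw [hb, pvLoopA_other b c rest hbt hc hp]
        simp [ih b]

-- ===== VERDICT (by name: the statement is the Claim_ definition above) =====
theorem escape_pipe_py_spec : Claim_equal_escape_pipe_py := by
  intro value _
  unfold Spec_escape_pipe_py escape_pipe_py escape_pipe_py_alt
  split_ifs with h
  · rfl
  · rw [pvLoopA_eq]
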